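-- pv_equiv track=rewrite | github.com/daviddanielarch-zz/jenkins_flaky | utils/add_flaky_marker.py | add_flaky_marker
-- ===== SOURCE A (Python) =====
-- def is_duplicated(thing, lines):
--     count = 0
--     for line in lines:
--         if thing in line:
--             count += 1
--
--     return count > 1
--
-- def get_index(lines, function_name):
--     for index, line in enumerate(lines):
--         if not line:
--             last_blank_line = index
--
--         if function_name in line:
--             return last_blank_line
--
--     raise Exception(f'{function_name} is not defined')
--
-- def test_in_file(lines, function_name):
--     found = False
--     for line in lines:
--         if function_name in line:
--             found = True
--             break
--
--     return found
--
-- def add_flaky_marker(file_content, function_name, class_name=None, comment=''):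
--     lines = file_content.splitlines()
--     new_file_lines = []
--
--     if not test_in_file(lines, function_name):
--         raise Exception(f'{function_name} is not defined')
--
--     if is_duplicated(function_name, lines):
--         raise Exception(f'{function_name} is defined more than once')
--
--     line_to_add_marker = get_index(lines, function_name)
--
--     if class_name:
--         whitespaces = 4
--     else:
--         whitespaces = 0
--
--     for index, line in enumerate(lines):
--         new_file_lines.append(line)
--
--         if index == line_to_add_marker:
--             marker = f"{' ' * whitespaces}@pytest.mark.flaky"
--             if comment:
--                 marker += f' # {comment}'
--
--             new_file_lines.append(marker)
--
--     return '\n'.join(new_file_lines)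
-- ===== SOURCE B (Python) =====
-- def add_flaky_marker(file_content, function_name, class_name=None, comment=''):
--     lines = file_content.splitlines()
--     matches = [i for i, line in enumerate(lines) if function_name in line]
--     if not matches:
--         raise Exception(f'{function_name} is not defined')
--     if len(matches) > 1:
--         raise Exception(f'{function_name} is defined more than once')
--     m = matches[0]
--     blanks = [i for i in range(m + 1) if not lines[i]]
--     pos = blanks[-1]  # raises IndexError when no blank line precedes the match (A raises there too)
--     indent = '    ' if class_name else ''
--     marker = indent + '@pytest.mark.flaky' + (f' # {comment}' if comment else '')
--     return '\n'.join(lines[:pos + 1] + [marker] + lines[pos + 1:])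
-- ===== Notes on version B (the rewrite author's own statement) =====
-- stated objective: simpler
-- what changed: Replaces the three helper scans (test_in_file, is_duplicated, get_index) and the index-tracking rebuild loop with two comprehensions (match indices, blank indices before the match) and a single slice-based insertion.
import Mathlib
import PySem

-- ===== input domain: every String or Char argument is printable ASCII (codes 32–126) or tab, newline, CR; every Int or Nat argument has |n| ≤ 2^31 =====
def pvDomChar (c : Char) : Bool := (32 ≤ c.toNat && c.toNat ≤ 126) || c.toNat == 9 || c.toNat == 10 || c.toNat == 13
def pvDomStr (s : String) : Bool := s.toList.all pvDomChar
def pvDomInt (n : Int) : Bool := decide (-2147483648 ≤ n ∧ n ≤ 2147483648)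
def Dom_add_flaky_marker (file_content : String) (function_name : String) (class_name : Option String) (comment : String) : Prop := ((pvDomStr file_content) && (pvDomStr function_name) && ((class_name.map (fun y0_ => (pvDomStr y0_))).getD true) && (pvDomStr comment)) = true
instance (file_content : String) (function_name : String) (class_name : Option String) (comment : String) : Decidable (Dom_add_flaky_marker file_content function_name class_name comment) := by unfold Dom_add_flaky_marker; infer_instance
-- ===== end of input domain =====

-- B replaces A's three helper scans and index-tracking rebuild loop with two index
-- comprehensions and a slice-based insertion; equivalence on Pre_ (A raises elsewhere).

-- ===== PORT A =====

-- test_in_file: loop with break on first match = List.any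
def pvTestInFile (lines : List String) (function_name : String) : Bool :=
  lines.any (fun line => PySem.Str.isIn function_name line)

-- is_duplicated: counting loop, then count > 1
def pvIsDuplicated (thing : String) (lines : List String) : Bool :=
  decide ((lines.foldl (fun count line => if PySem.Str.isIn thing line then count + 1 else count) (0 : Int)) > 1)

-- get_index: 'for index, line in enumerate(lines)' as recursion with index counter;
-- last_blank_line is an Option (none = unbound → A raises UnboundLocalError, excluded by Pre_)
def pvGetIndex (function_name : String) : List String → Nat → Option Nat → Option Nat
  | [], _, _ => none
  | line :: rest, index, lastBlank =>
    let lastBlank := if line == "" then some index else lastBlank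
    if PySem.Str.isIn function_name line then lastBlank
    else pvGetIndex function_name rest (index + 1) lastBlank

-- the final rebuild loop of A
def pvBuild (t : Nat) (marker : String) : List String → Nat → List String → List String
  | [], _, acc => acc
  | line :: rest, index, acc =>
    let acc := acc ++ [line]
    let acc := if index == t then acc ++ [marker] else acc
    pvBuild t marker rest (index + 1) acc

def add_flaky_marker (file_content : String) (function_name : String) (class_name : Option String) (comment : String) : String :=
  let lines := PySem.Str.splitlines file_content
  if !(pvTestInFile lines function_name) then ""       -- A raises Exception: excluded by Pre_
  else if pvIsDuplicated function_name lines then ""   -- A raises Exception: excluded by Pre_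
  else
    match pvGetIndex function_name lines 0 none with
    | none => ""                                       -- A raises UnboundLocalError: excluded by Pre_
    | some line_to_add_marker =>
      let whitespaces : Nat := match class_name with   -- 'if class_name:' truthiness
        | some s => if s == "" then 0 else 4
        | none => 0
      let marker0 := String.ofList (List.replicate whitespaces ' ') ++ "@pytest.mark.flaky"
      let marker := if comment == "" then marker0 else marker0 ++ (" # " ++ comment)
      PySem.Str.join "\n" (pvBuild line_to_add_marker marker lines 0 [])

-- ===== PORT B =====

-- [i for i, line in enumerate(lines) if function_name in line]
def pvMatches (function_name : String) : List String → Nat → List Nat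
  | [], _ => []
  | line :: rest, i =>
    if PySem.Str.isIn function_name line then i :: pvMatches function_name rest (i + 1)
    else pvMatches function_name rest (i + 1)

def add_flaky_marker_alt (file_content : String) (function_name : String) (class_name : Option String) (comment : String) : String :=
  let lines := PySem.Str.splitlines file_content
  let ms := pvMatches function_name lines 0
  if ms.isEmpty then ""                           -- B raises Exception: excluded by Pre_
  else if ms.length > 1 then ""                   -- B raises Exception: excluded by Pre_
  else
    let m := ms.headD 0
    -- [i for i in range(m + 1) if not lines[i]]  (i < len(lines) always, so getD is exact)
    let blanks := (List.range (m + 1)).filter (fun i => lines.getD i "" == "")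
    match blanks.getLast? with                         -- blanks[-1]
    | none => ""                                       -- B raises IndexError: excluded by Pre_
    | some pos =>
      let indent := if (match class_name with | some s => !(s == "") | none => false) then "    " else ""
      let marker := (indent ++ "@pytest.mark.flaky") ++ (if comment == "" then "" else " # " ++ comment)
      -- lines[:pos+1] + [marker] + lines[pos+1:]  (nonnegative in-range slices = take/drop)
      PySem.Str.join "\n" (lines.take (pos + 1) ++ [marker] ++ lines.drop (pos + 1))

-- ===== PRECONDITION & SPEC =====

-- Pre_ = exactly the inputs where A returns: the function name occurs (as a substring) in
-- exactly one line, and some blank line occurs at or before that line (otherwise A raises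
-- Exception / Exception / UnboundLocalError respectively; B raises on the same inputs).
def Pre_add_flaky_marker (file_content : String) (function_name : String) (class_name : Option String) (comment : String) : Prop :=
  let lines := PySem.Str.splitlines file_content
  lines.countP (fun line => PySem.Str.isIn function_name line) = 1 ∧
  ∃ m, m < lines.length ∧ PySem.Str.isIn function_name (lines.getD m "") = true ∧
    (∀ i, i < m → ¬ (PySem.Str.isIn function_name (lines.getD i "") = true)) ∧
    ∃ j, j < m + 1 ∧ lines.getD j "" = ""

instance (file_content : String) (function_name : String) (class_name : Option String) (comment : String) : Decidable (Pre_add_flaky_marker file_content function_name class_name comment) := by unfold Pre_add_flaky_marker; infer_instance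

def pvWitness_add_flaky_marker : String × String × Option String × String :=
  ("\ndef foo():", "foo", none, "")

def Spec_add_flaky_marker (file_content : String) (function_name : String) (class_name : Option String) (comment : String) (out : String) : Prop := out = add_flaky_marker_alt file_content function_name class_name comment

instance (file_content : String) (function_name : String) (class_name : Option String) (comment : String) (out : String) : Decidable (Spec_add_flaky_marker file_content function_name class_name comment out) := by unfold Spec_add_flaky_marker; infer_instance

-- ===== CLAIM =====

def Claim_equal_add_flaky_marker : Prop := ∀ (file_content : String) (function_name : String) (class_name : Option String) (comment : String), Dom_add_flaky_marker file_content function_name class_name comment → Pre_add_flaky_marker file_content function_name class_name comment → Spec_add_flaky_marker file_content function_name class_name comment (add_flaky_marker file_content function_name class_name comment)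

-- ===== LEMMAS AND PROOFS =====

theorem pv_count_lemma (fn : String) (ls : List String) (c : Int) :
    ls.foldl (fun count line => if PySem.Str.isIn fn line then count + 1 else count) c
      = c + (ls.countP (fun line => PySem.Str.isIn fn line) : Int) :=
  PySem.List.foldl_if_add_one _ ls c

theorem pv_matches_length (fn : String) (ls : List String) (i : Nat) :
    (pvMatches fn ls i).length = ls.countP (fun line => PySem.Str.isIn fn line) := by
  induction ls generalizing i with
  | nil => simp [pvMatches]
  | cons l rest ih =>
    simp only [pvMatches, List.countP_cons]
    by_cases h : PySem.Str.isIn fn l = true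
    · rw [if_pos h, if_pos h, List.length_cons, ih]
    · rw [if_neg h, if_neg h, ih]; omega

theorem pv_matches_head (fn : String) (ls : List String) (i m : Nat)
    (hm : m < ls.length)
    (hP : PySem.Str.isIn fn (ls.getD m "") = true)
    (hfirst : ∀ k, k < m → ¬ (PySem.Str.isIn fn (ls.getD k "") = true)) :
    (pvMatches fn ls i).headD 0 = i + m := by
  induction ls generalizing i m with
  | nil => simp at hm
  | cons l rest ih =>
    cases m with
    | zero =>
      have h : PySem.Str.isIn fn l = true := by simpa using hP
      simp only [pvMatches]
      rw [if_pos h]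
      simp
    | succ m' =>
      have h0 : ¬ (PySem.Str.isIn fn l = true) := by
        simpa using hfirst 0 (Nat.succ_pos m')
      simp only [pvMatches]
      rw [if_neg h0]
      rw [ih (i + 1) m' (by simpa using hm) (by simpa using hP)
        (fun k hk => by simpa using hfirst (k + 1) (by omega))]
      omega

theorem pv_lastblank_cons (l : String) (rest : List String) (m : Nat) :
    ((List.range (m + 1 + 1)).filter (fun i => (l :: rest).getD i "" == "")).getLast?
      = match ((List.range (m + 1)).filter (fun i => rest.getD i "" == "")).getLast? with
        | some j => some (j + 1)
        | none => if l == "" then some 0 else none := by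
  have hcomp : ((fun i => (l :: rest).getD i "" == "") ∘ Nat.succ)
      = (fun i => rest.getD i "" == "") := by
    funext i; simp [Function.comp]
  rw [List.range_succ_eq_map, List.filter_cons, List.filter_map, hcomp, List.getD_cons_zero]
  by_cases hl : (l == "") = true
  · rw [if_pos hl]
    cases hlast : ((List.range (m + 1)).filter (fun i => rest.getD i "" == "")).getLast? with
    | none =>
      rw [List.getLast?_eq_none_iff.mp hlast]
      simp [hl]
    | some j =>
      rw [List.getLast?_cons, List.getLast?_map, hlast]
      simp
  · rw [if_neg hl, List.getLast?_map]
    cases hlast : ((List.range (m + 1)).filter (fun i => rest.getD i "" == "")).getLast? with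
    | none => simp [hl]
    | some j => simp

theorem pv_getindex_eq (fn : String) (ls : List String) (idx : Nat) (lb : Option Nat) (m : Nat)
    (hm : m < ls.length)
    (hP : PySem.Str.isIn fn (ls.getD m "") = true)
    (hfirst : ∀ k, k < m → ¬ (PySem.Str.isIn fn (ls.getD k "") = true)) :
    pvGetIndex fn ls idx lb
      = match ((List.range (m + 1)).filter (fun i => ls.getD i "" == "")).getLast? with
        | some j => some (idx + j)
        | none => lb := by
  induction ls generalizing idx lb m with
  | nil => simp at hm
  | cons l rest ih =>
    cases m with
    | zero =>
      have h : PySem.Str.isIn fn l = true := by simpa using hP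
      simp only [pvGetIndex]
      rw [if_pos h]
      rw [show List.range (0 + 1) = [0] from rfl, List.filter_cons, List.getD_cons_zero]
      by_cases hl : (l == "") = true
      · rw [if_pos hl]; simp [hl]
      · rw [if_neg hl]; simp [hl]
    | succ m' =>
      have h0 : ¬ (PySem.Str.isIn fn l = true) := by
        simpa using hfirst 0 (Nat.succ_pos m')
      simp only [pvGetIndex]
      rw [if_neg h0]
      rw [ih (idx + 1) (if l == "" then some idx else lb) m'
        (by simpa using hm) (by simpa using hP)
        (fun k hk => by simpa using hfirst (k + 1) (by omega))]
      rw [pv_lastblank_cons]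
      cases hlast : ((List.range (m' + 1)).filter (fun i => rest.getD i "" == "")).getLast? with
      | none =>
        by_cases hl : (l == "") = true
        · simp [hl]
        · simp [hl]
      | some j =>
        simp only [Option.some.injEq]
        omega

theorem pv_build_eq (t : Nat) (marker : String) (ls : List String) (idx : Nat) (acc : List String) :
    pvBuild t marker ls idx acc
      = if idx ≤ t ∧ t < idx + ls.length
          then acc ++ ls.take (t + 1 - idx) ++ [marker] ++ ls.drop (t + 1 - idx)
          else acc ++ ls := by
  induction ls generalizing idx acc with
  | nil =>
    have h : ¬ (idx ≤ t ∧ t < idx + ([] : List String).length) := by simp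
    rw [if_neg h]
    simp [pvBuild]
  | cons l rest ih =>
    by_cases ht : idx = t
    · subst ht
      simp only [pvBuild, BEq.rfl, if_pos]
      rw [ih]
      have hcond : ¬ (idx + 1 ≤ idx ∧ idx < idx + 1 + rest.length) := by omega
      have hcond2 : idx ≤ idx ∧ idx < idx + (l :: rest).length := by simp
      rw [if_neg hcond, if_pos hcond2]
      have e1 : idx + 1 - idx = 1 := by omega
      rw [e1]
      simp
    · have hne : (idx == t) = false := by simpa using ht
      simp only [pvBuild, hne, Bool.false_eq_true, if_false]
      rw [ih]
      by_cases hc : idx + 1 ≤ t ∧ t < idx + 1 + rest.length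
      · have hc2 : idx ≤ t ∧ t < idx + (l :: rest).length := by
          simp only [List.length_cons]; omega
        rw [if_pos hc, if_pos hc2]
        have e1 : t + 1 - idx = (t + 1 - (idx + 1)) + 1 := by omega
        rw [e1]
        simp
      · have hc2 : ¬ (idx ≤ t ∧ t < idx + (l :: rest).length) := by
          simp only [List.length_cons]; omega
        rw [if_neg hc, if_neg hc2]
        simp

theorem pv_str_append_empty (s : String) : s ++ "" = s := by
  simp

theorem pv_marker_eq (cn : Option String) (comment : String) :
    (let ws : Nat := match cn with | some s => if s == "" then 0 else 4 | none => 0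
     let m0 := String.ofList (List.replicate ws ' ') ++ "@pytest.mark.flaky"
     if comment == "" then m0 else m0 ++ (" # " ++ comment))
      = ((if (match cn with | some s => !(s == "") | none => false) then "    " else "")
          ++ "@pytest.mark.flaky")
        ++ (if comment == "" then "" else " # " ++ comment) := by
  have key : String.ofList (List.replicate
        (match cn with | some s => if s == "" then 0 else 4 | none => 0) ' ')
      = (if (match cn with | some s => !(s == "") | none => false) then "    " else "") := by
    cases cn with
    | none => rfl
    | some s =>
      by_cases hs : (s == "") = true
      · simp only [hs]; rfl
      · simp only [hs]; rfl
  simp only [key]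
  by_cases hc : (comment == "") = true
  · rw [if_pos hc, if_pos hc, pv_str_append_empty]
  · rw [if_neg hc, if_neg hc]

-- ===== VERDICT =====

theorem add_flaky_marker_spec : Claim_equal_add_flaky_marker := by
  intro fc fn cn comment _hDom hPre
  unfold Spec_add_flaky_marker
  clear _hDom
  simp only [Pre_add_flaky_marker] at hPre
  obtain ⟨hcount, m, hm, hP, hfirst, j, hj, hblank⟩ := hPre
  have hgetm : (PySem.Str.splitlines fc).getD m "" = (PySem.Str.splitlines fc)[m] :=
    List.getD_eq_getElem _ _ hm
  -- the blank-candidate list both sides compute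
  have hjfl : j ∈ (List.range (m + 1)).filter
      (fun i => (PySem.Str.splitlines fc).getD i "" == "") :=
    List.mem_filter.mpr ⟨List.mem_range.mpr hj, by simp only [hblank]; rfl⟩
  obtain ⟨pos, hpos⟩ : ∃ p, ((List.range (m + 1)).filter
      (fun i => (PySem.Str.splitlines fc).getD i "" == "")).getLast? = some p := by
    cases h : ((List.range (m + 1)).filter
        (fun i => (PySem.Str.splitlines fc).getD i "" == "")).getLast? with
    | none =>
      exact absurd (List.getLast?_eq_none_iff.mp h) (List.ne_nil_of_mem hjfl)
    | some p => exact ⟨p, rfl⟩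
  have hposlt : pos < (PySem.Str.splitlines fc).length := by
    obtain ⟨ys, hys⟩ := List.getLast?_eq_some_iff.mp hpos
    have : pos ∈ (List.range (m + 1)).filter
        (fun i => (PySem.Str.splitlines fc).getD i "" == "") := by
      rw [hys]; simp
    have := List.mem_range.mp (List.mem_filter.mp this).1
    omega
  -- A side
  have htest : pvTestInFile (PySem.Str.splitlines fc) fn = true := by
    unfold pvTestInFile
    exact List.any_eq_true.mpr ⟨_, List.getElem_mem hm, by rw [← hgetm]; exact hP⟩
  have hdup : pvIsDuplicated fn (PySem.Str.splitlines fc) = false := by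
    unfold pvIsDuplicated
    rw [pv_count_lemma, hcount]
    decide
  have hgi : pvGetIndex fn (PySem.Str.splitlines fc) 0 none = some pos := by
    rw [pv_getindex_eq fn _ 0 none m hm hP hfirst, hpos]
    simp
  have hA : add_flaky_marker fc fn cn comment
      = PySem.Str.join "\n"
          ((PySem.Str.splitlines fc).take (pos + 1)
            ++ [(let ws : Nat := match cn with | some s => if s == "" then 0 else 4 | none => 0
                 let m0 := String.ofList (List.replicate ws ' ') ++ "@pytest.mark.flaky"
                 if comment == "" then m0 else m0 ++ (" # " ++ comment))]
            ++ (PySem.Str.splitlines fc).drop (pos + 1)) := by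
    simp only [add_flaky_marker, htest, hdup, hgi, Bool.not_true, Bool.false_eq_true,
      if_false, pv_build_eq]
    have hcond : 0 ≤ pos ∧ pos < 0 + (PySem.Str.splitlines fc).length := by omega
    rw [if_pos hcond]
    simp only [List.nil_append, Nat.sub_zero]
  -- B side
  have hlen : (pvMatches fn (PySem.Str.splitlines fc) 0).length = 1 := by
    rw [pv_matches_length, hcount]
  have hemp : (pvMatches fn (PySem.Str.splitlines fc) 0).isEmpty = false := by
    rw [List.isEmpty_eq_false_iff_exists_mem]
    cases hms : pvMatches fn (PySem.Str.splitlines fc) 0 with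
    | nil => rw [hms] at hlen; simp at hlen
    | cons a t => exact ⟨a, by simp⟩
  have hhead : (pvMatches fn (PySem.Str.splitlines fc) 0).headD 0 = m := by
    rw [pv_matches_head fn _ 0 m hm hP hfirst]; omega
  have hB : add_flaky_marker_alt fc fn cn comment
      = PySem.Str.join "\n"
          ((PySem.Str.splitlines fc).take (pos + 1)
            ++ [((if (match cn with | some s => !(s == "") | none => false) then "    " else "")
                  ++ "@pytest.mark.flaky")
                ++ (if comment == "" then "" else " # " ++ comment)]
            ++ (PySem.Str.splitlines fc).drop (pos + 1)) := by
    simp only [add_flaky_marker_alt, hemp, Bool.false_eq_true, if_false, hlen, hhead, hpos]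
    norm_num
  rw [hA, hB, pv_marker_eq cn comment]
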